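-- pv_equiv track=rewrite | github.com/Zenfin/medical_classification | data_loader.py | group_by_dependent_variable
-- ===== SOURCE A (Python) =====
-- def group_by_dependent_variable(data, varname):
--     grouped_data = {}
--     index = data[0].index(varname)
--     for row in data[1:]:
--         class_ = row[index]
--         del row[index]
--         grouped_data.setdefault(class_, [])
--         grouped_data[class_].append(row)
--     return grouped_data
-- ===== SOURCE B (Python) =====
-- def group_by_dependent_variable(data, varname):
--     index = data[0].index(varname)
--     rows = data[1:]
--     keys = [row.pop(index) for row in rows]
--     return {k: [row for row, key in zip(rows, keys) if key == k]
--             for k in dict.fromkeys(keys)}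
-- ===== Notes on version B (the rewrite author's own statement) =====
-- stated objective: alternative
-- what changed: B first pops all keys out of the rows in one comprehension, then builds the result by mapping over the first-occurrence-deduplicated key list and filtering the (row, key) pairs for each key, instead of A's row-by-row incremental dict of growing lists; both mutate the rows in place identically.
import Mathlib
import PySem

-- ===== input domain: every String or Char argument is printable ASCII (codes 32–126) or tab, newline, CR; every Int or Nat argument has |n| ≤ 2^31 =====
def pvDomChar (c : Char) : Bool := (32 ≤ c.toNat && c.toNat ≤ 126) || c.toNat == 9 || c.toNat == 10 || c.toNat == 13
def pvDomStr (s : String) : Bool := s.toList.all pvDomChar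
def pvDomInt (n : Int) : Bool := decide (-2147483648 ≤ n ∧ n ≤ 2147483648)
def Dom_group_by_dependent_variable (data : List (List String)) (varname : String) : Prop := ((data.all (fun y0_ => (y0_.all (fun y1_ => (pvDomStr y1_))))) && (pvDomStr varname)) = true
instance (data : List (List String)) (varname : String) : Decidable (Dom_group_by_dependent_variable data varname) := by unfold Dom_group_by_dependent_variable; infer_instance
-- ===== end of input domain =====

-- B groups the rows by mapping over the deduplicated key list and filtering per key,
-- instead of A's incremental grouping dict; return values proved equal on Pre_.
-- Both Pythons mutate the data rows in place identically (del/pop of the key column);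
-- the equivalence proved here is about the return value.

-- ===== PORT A =====
def group_by_dependent_variable (data : List (List String)) (varname : String) : List (String × List (List String)) :=
  match data with
  | [] => []  -- data[0] raises IndexError: excluded by Pre_
  | head :: _ =>
    match PySem.List.index? head varname with
    | none => []  -- .index raises ValueError: excluded by Pre_
    | some index =>
      (PySem.List.slice data (some 1) none).foldl (fun grouped row =>
        match PySem.List.pyGet? row (index : Int) with
        | none => grouped  -- row[index] raises IndexError: excluded by Pre_
        | some class_ =>
          let row' := row.eraseIdx index  -- del row[index]; exact since 0 ≤ index < len(row) here
          let g1 := PySem.Dict.setdefault grouped class_ []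
          PySem.Dict.insert g1 class_ (PySem.Dict.getD g1 class_ [] ++ [row']))
        (PySem.Dict.mk [])
      |>.items

-- ===== PORT B =====
def group_by_dependent_variable_alt (data : List (List String)) (varname : String) : List (String × List (List String)) :=
  match data with
  | [] => []  -- data[0] raises IndexError: excluded by Pre_
  | head :: rows =>
    match PySem.List.index? head varname with
    | none => []  -- .index raises ValueError: excluded by Pre_
    | some index =>
      -- keys = [row.pop(index) for row in rows]; the rows afterwards (popped in place in Python)
      let keys := rows.map (fun row =>
        match PySem.List.pop? row (index : Int) with | some kr => kr.1 | none => "")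
      let rows' := rows.map (fun row =>
        match PySem.List.pop? row (index : Int) with | some kr => kr.2 | none => row)
      (PySem.List.dedup keys).map (fun k =>
        (k, (rows'.zip keys).filterMap (fun rk => if rk.2 == k then some rk.1 else none)))

-- ===== PRECONDITION & SPEC =====
-- Pre_ excludes exactly the inputs where A raises: empty data (IndexError on data[0]),
-- varname absent from the header row (ValueError from .index), and a data row too short
-- for the key column (IndexError on row[index]).  B raises on the same inputs.
def Pre_group_by_dependent_variable (data : List (List String)) (varname : String) : Prop :=
  data ≠ [] ∧ varname ∈ data.headI ∧ ∀ row ∈ data.tail, data.headI.idxOf varname < row.length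
instance (data : List (List String)) (varname : String) : Decidable (Pre_group_by_dependent_variable data varname) := by unfold Pre_group_by_dependent_variable; infer_instance

def pvWitness_group_by_dependent_variable : List (List String) × String :=
  ([["id", "y", "x"], ["1", "a", "p"], ["2", "b", "q"], ["3", "a", "r"]], "y")

def Spec_group_by_dependent_variable (data : List (List String)) (varname : String) (out : List (String × List (List String))) : Prop := out = group_by_dependent_variable_alt data varname
instance (data : List (List String)) (varname : String) (out : List (String × List (List String))) : Decidable (Spec_group_by_dependent_variable data varname out) := by unfold Spec_group_by_dependent_variable; infer_instance

-- ===== CLAIM (what is proved, stated in full; the proofs are below) =====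
def Claim_equal_group_by_dependent_variable : Prop := ∀ (data : List (List String)) (varname : String), Dom_group_by_dependent_variable data varname → Pre_group_by_dependent_variable data varname → Spec_group_by_dependent_variable data varname (group_by_dependent_variable data varname)

-- ===== LEMMAS AND PROOFS =====

-- A's loop body on an already-extracted (key, row) pair
def gstep (g : PySem.Dict String (List (List String))) (p : String × List String) :
    PySem.Dict String (List (List String)) :=
  let g1 := PySem.Dict.setdefault g p.1 []
  PySem.Dict.insert g1 p.1 (PySem.Dict.getD g1 p.1 [] ++ [p.2])

-- B's shape on the same pairs
def gF (pairs : List (String × List String)) (k : String) : List (List String) :=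
  pairs.filterMap (fun q => if q.1 == k then some q.2 else none)

def gspec (pairs : List (String × List String)) : List (String × List (List String)) :=
  (PySem.List.dedup (pairs.map Prod.fst)).map (fun k => (k, gF pairs k))

theorem dedup_snoc {α : Type} [BEq α] [LawfulBEq α] (l : List α) (c : α) :
    PySem.List.dedup (l ++ [c]) =
      if c ∈ l then PySem.List.dedup l else PySem.List.dedup l ++ [c] := by
  have h : PySem.List.dedup (l ++ [c]) = PySem.Set.add (PySem.List.dedup l) c := by
    simp [PySem.List.dedup, PySem.Set.ofList, List.foldl_append]
  rw [h]
  simp [PySem.Set.add]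

theorem gF_snoc (ps : List (String × List String)) (x : String × List String)
    (k : String) :
    gF (ps ++ [x]) k = gF ps k ++ (if x.1 = k then [x.2] else []) := by
  simp [gF, List.filterMap_append]
  split_ifs with h <;> simp [h]

theorem gF_nil_of_not_mem (ps : List (String × List String)) (c : String)
    (hc : c ∉ ps.map Prod.fst) : gF ps c = [] := by
  rw [gF, List.filterMap_eq_nil_iff]
  intro q hq
  have : q.1 ≠ c := fun h => hc (h ▸ List.mem_map_of_mem hq)
  simp [this]

theorem find?_map_self {G : String → List (List String)} (l : List String) (c : String)
    (hnd : l.Nodup) (hc : c ∈ l) :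
    List.find? (fun p => p.1 == c) (l.map (fun k => (k, G k))) = some (c, G c) := by
  induction l with
  | nil => cases hc
  | cons a t ih =>
    rcases List.mem_cons.mp hc with h | h
    · subst h; simp
    · have hne : a ≠ c := fun he => (List.nodup_cons.mp hnd).1 (he ▸ h)
      simp only [List.map_cons, List.find?_cons]
      rw [show (((a, G a).1 == c)) = false by simpa using hne]
      exact ih (List.nodup_cons.mp hnd).2 h

theorem contains_gspec (ps : List (String × List String)) (c : String) :
    (PySem.Dict.mk (gspec ps)).contains c = decide (c ∈ ps.map Prod.fst) := by
  simp only [PySem.Dict.contains, gspec, List.any_map, Function.comp_def]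
  by_cases hm : c ∈ List.map Prod.fst ps
  · rw [decide_eq_true hm, List.any_eq_true]
    exact ⟨c, (PySem.List.mem_dedup _ _).mpr hm, by simp⟩
  · rw [decide_eq_false hm, List.any_eq_false]
    intro x hx
    have hxm : x ∈ List.map Prod.fst ps := (PySem.List.mem_dedup _ _).mp hx
    simp only [beq_iff_eq]
    exact fun he => hm (he ▸ hxm)

theorem gfold_items (pairs : List (String × List String)) :
    (pairs.foldl gstep (PySem.Dict.mk [])).items = gspec pairs := by
  induction pairs using List.reverseRecOn with
  | nil => simp [gspec, gF, PySem.List.dedup, PySem.Set.ofList, PySem.Set.empty]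
  | append_singleton ps x ih =>
    obtain ⟨c, r⟩ := x
    rw [List.foldl_append, List.foldl_cons, List.foldl_nil]
    have hitems : (ps.foldl gstep (PySem.Dict.mk [])) = PySem.Dict.mk (gspec ps) := by
      cases h : ps.foldl gstep (PySem.Dict.mk [])
      simpa [h] using ih
    rw [hitems]
    by_cases hc : c ∈ ps.map Prod.fst
    · -- key already present: setdefault is a no-op, insert overwrites in place
      have hcont : (PySem.Dict.mk (gspec ps)).contains c = true := by
        rw [contains_gspec]; exact decide_eq_true hc
      have hmemdd : c ∈ PySem.List.dedup (ps.map Prod.fst) := by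
        simpa [PySem.List.mem_dedup] using hc
      have hget : PySem.Dict.getD (PySem.Dict.mk (gspec ps)) c [] = gF ps c := by
        unfold PySem.Dict.getD PySem.Dict.get? gspec
        rw [find?_map_self _ c (PySem.List.nodup_dedup _) hmemdd]
        rfl
      have hdd : PySem.List.dedup (ps.map Prod.fst ++ [c]) = PySem.List.dedup (ps.map Prod.fst) := by
        rw [dedup_snoc]; simp [hc]
      simp only [gstep, PySem.Dict.setdefault, hcont, if_true, PySem.Dict.insert, hget]
      simp only [gspec, List.map_append, List.map_cons, List.map_nil, hdd, List.map_map]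
      apply List.map_congr_left
      intro k hk
      by_cases hkc : k = c
      · subst hkc; simp [gF_snoc]
      · simp [hkc, gF_snoc, Ne.symm hkc]
    · -- new key: setdefault appends (c, []), insert then rewrites that entry
      have hcont : (PySem.Dict.mk (gspec ps)).contains c = false := by
        rw [contains_gspec]; exact decide_eq_false hc
      have hknotin : ∀ k ∈ PySem.List.dedup (ps.map Prod.fst), k ≠ c := by
        intro k hk he; exact hc (he ▸ ((PySem.List.mem_dedup _ _).mp hk))
      have hfind : List.find? (fun p => p.1 == c) (gspec ps) = none := by
        rw [List.find?_eq_none]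
        intro p hp
        simp only [gspec] at hp
        rcases List.mem_map.mp hp with ⟨k, hk, hpk⟩
        simpa [← hpk] using hknotin k hk
      have hcont2 : (PySem.Dict.mk (gspec ps ++ [(c, [])])).contains c = true := by
        simp [PySem.Dict.contains]
      have hget : PySem.Dict.getD (PySem.Dict.mk (gspec ps ++ [(c, [])])) c [] = [] := by
        simp [PySem.Dict.getD, PySem.Dict.get?, List.find?_append, hfind]
      have hdd : PySem.List.dedup (ps.map Prod.fst ++ [c]) =
          PySem.List.dedup (ps.map Prod.fst) ++ [c] := by
        rw [dedup_snoc]; simp [hc]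
      simp only [gstep, PySem.Dict.setdefault, hcont, Bool.false_eq_true, if_false,
                 PySem.Dict.insert, hcont2, if_true, hget]
      simp only [gspec, List.map_append, List.map_cons, List.map_nil, hdd, List.map_map,
                 List.map_append]
      congr 1
      · apply List.map_congr_left
        intro k hk
        have : k ≠ c := hknotin k hk
        simp [this, gF_snoc, Ne.symm this]
      · simp [gF_snoc, gF_nil_of_not_mem ps c hc]

theorem index?_eq_idxOf_of_mem (l : List String) (a : String) (h : a ∈ l) :
    PySem.List.index? l a = some (l.idxOf a) := by
  induction l with
  | nil => cases h
  | cons x t ih =>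
    by_cases hx : x = a
    · subst hx
      rw [PySem.List.index?_cons_self]
      simp
    · have ht : a ∈ t := by
        rcases List.mem_cons.mp h with h' | h'
        · exact absurd h'.symm hx
        · exact h'
      rw [PySem.List.index?_cons_of_ne _ hx, ih ht]
      simp [hx]

theorem afold_eq (k : Nat) (rows : List (List String))
    (hlen : ∀ row ∈ rows, k < row.length) (g0 : PySem.Dict String (List (List String))) :
    rows.foldl (fun grouped row =>
        match PySem.List.pyGet? row (k : Int) with
        | none => grouped
        | some class_ =>
          let row' := row.eraseIdx k
          let g1 := PySem.Dict.setdefault grouped class_ []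
          PySem.Dict.insert g1 class_ (PySem.Dict.getD g1 class_ [] ++ [row'])) g0
    = (rows.map (fun row => (row.getD k "", row.eraseIdx k))).foldl gstep g0 := by
  induction rows generalizing g0 with
  | nil => rfl
  | cons row rest ih =>
    have hk : k < row.length := hlen row (by simp)
    have hget : PySem.List.pyGet? row (k : Int) = some (row.getD k "") := by
      rw [PySem.List.pyGet?_natCast, List.getElem?_eq_getElem hk, List.getD_eq_getElem _ _ hk]
    simp only [List.foldl_cons, List.map_cons, hget]
    rw [ih (fun r hr => hlen r (List.mem_cons_of_mem _ hr))]
    rfl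

theorem group_by_dependent_variable_spec : Claim_equal_group_by_dependent_variable := by
  intro data varname _ hpre
  unfold Spec_group_by_dependent_variable
  obtain ⟨hne, hmem, hlen⟩ := hpre
  match data with
  | [] => exact absurd rfl hne
  | head :: rows =>
    simp only [List.headI_cons] at hmem hlen
    simp only [List.tail_cons] at hlen
    have hidx : PySem.List.index? head varname = some (head.idxOf varname) :=
      index?_eq_idxOf_of_mem head varname hmem
    simp only [group_by_dependent_variable, group_by_dependent_variable_alt, hidx,
               PySem.List.slice_from_one, List.tail_cons]
    rw [afold_eq (head.idxOf varname) rows hlen]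
    rw [gfold_items]
    have hpop : ∀ row ∈ rows, PySem.List.pop? row ((head.idxOf varname : Nat) : Int) =
        some (row.getD (head.idxOf varname) "", row.eraseIdx (head.idxOf varname)) := by
      intro row hr
      rw [PySem.List.pop?_natCast row _ (hlen row hr), List.getD_eq_getElem _ _ (hlen row hr)]
    have hkeys : rows.map (fun row =>
        match PySem.List.pop? row ((head.idxOf varname : Nat) : Int) with
        | some kr => kr.1 | none => "") = rows.map (fun row => row.getD (head.idxOf varname) "") := by
      apply List.map_congr_left
      intro row hr
      rw [hpop row hr]
    have hrows : rows.map (fun row =>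
        match PySem.List.pop? row ((head.idxOf varname : Nat) : Int) with
        | some kr => kr.2 | none => row) = rows.map (fun row => row.eraseIdx (head.idxOf varname)) := by
      apply List.map_congr_left
      intro row hr
      rw [hpop row hr]
    simp only [hkeys, hrows, List.zip_map', gspec, gF, List.map_map, List.filterMap_map,
               Function.comp_def]
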